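-- pv_equiv track=rewrite | github.com/limaagabriel/carl | simulation/clustering/metrics/cluster_2_graph.py | connect_cities_states
-- ===== SOURCE A (Python) =====
-- import copy
--
-- def connect_cities_states(matrix, cluster, names, same=True):
--     items = copy.deepcopy(cluster)
--     for item1 in cluster:
--         items.remove(item1)
--         for item2 in items:
--             try:
--                 state1 = int((names[item1])[1])
--                 state2 = int((names[item2])[1])
--                 if (same and (state1 == state2)) or (not same and (state1 != state2)):
--                     matrix[item1][item2] += 1
--                     matrix[item2][item1] += 1
--             except:
--                 pass
--     return matrix
-- ===== SOURCE B (Python) =====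
-- def connect_cities_states(matrix, cluster, names, same=True):
--     # Parse each cluster position's state digit once and bucket positions by state,
--     # then walk only the qualifying pairs and apply the symmetric increments.
--     groups = {}
--     for pos, item in enumerate(cluster):
--         try:
--             state = int(names[item][1])
--         except:
--             continue
--         groups.setdefault(state, []).append(pos)
--     order = list(groups.values())
--     pairs = []
--     if same:
--         for g in order:
--             for a in range(len(g)):
--                 for b in range(a + 1, len(g)):
--                     pairs.append((g[a], g[b]))
--     else:
--         for a in range(len(order)):
--             for b in range(a + 1, len(order)):
--                 for p in order[a]:
--                     for q in order[b]:
--                         pairs.append((min(p, q), max(p, q)))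
--     for p, q in pairs:
--         i, j = cluster[p], cluster[q]
--         try:
--             matrix[i][j] += 1
--             matrix[j][i] += 1
--         except:
--             pass
--     return matrix
-- ===== Notes on version B (the rewrite author's own statement) =====
-- stated objective: alternative
-- what changed: Instead of scanning all pairs while re-parsing both state digits inside the inner loop, B parses each cluster position's state once, buckets positions by state in a dict, and then enumerates only the qualifying pairs (within buckets for same=True, across distinct buckets for same=False) before applying the increments.
import Mathlib
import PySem

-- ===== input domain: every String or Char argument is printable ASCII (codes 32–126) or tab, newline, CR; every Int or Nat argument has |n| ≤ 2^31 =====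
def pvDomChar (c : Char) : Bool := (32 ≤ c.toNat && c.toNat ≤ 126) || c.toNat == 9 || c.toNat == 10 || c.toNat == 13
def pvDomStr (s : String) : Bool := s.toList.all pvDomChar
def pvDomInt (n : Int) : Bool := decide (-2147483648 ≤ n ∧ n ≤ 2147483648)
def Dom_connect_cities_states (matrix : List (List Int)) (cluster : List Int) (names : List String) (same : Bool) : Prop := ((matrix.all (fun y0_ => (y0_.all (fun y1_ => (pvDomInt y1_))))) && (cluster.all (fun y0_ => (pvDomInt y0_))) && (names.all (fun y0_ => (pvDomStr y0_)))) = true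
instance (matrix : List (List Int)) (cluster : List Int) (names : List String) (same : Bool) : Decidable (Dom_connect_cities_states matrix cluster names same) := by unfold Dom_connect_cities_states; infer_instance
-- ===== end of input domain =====

-- B buckets cluster positions by parsed state once and enumerates only qualifying pairs,
-- instead of A's scan over all pairs with per-pair re-parsing; equal return value is proved
-- (both Pythons also mutate `matrix` in place identically; the theorem is about the returned value).


-- ===== PORT A =====

-- int(names[item][1]) with the try-semantics: none = any raise (IndexError/ValueError)
def pvStateOf (names : List String) (v : Int) : Option Int :=
  match PySem.List.pyGet? names v with
  | none => none
  | some s =>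
    match PySem.Str.pyGet? s 1 with
    | none => none
    | some c => PySem.Int.ofChars? [c]

-- `matrix[i][j] += 1 ; matrix[j][i] += 1` inside try/except: any IndexError aborts the rest
def pvBumpTry (m : List (List Int)) (i j : Int) : List (List Int) :=
  match PySem.List.pyGet? m i with
  | none => m
  | some row =>
    match PySem.List.pyGet? row j with
    | none => m
    | some v =>
      let m1 := PySem.List.pySetD m i (PySem.List.pySetD row j (v + 1))
      match PySem.List.pyGet? m1 j with
      | none => m1
      | some row2 =>
        match PySem.List.pyGet? row2 i with
        | none => m1
        | some w => PySem.List.pySetD m1 j (PySem.List.pySetD row2 i (w + 1))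

-- the whole try-block of A for one (item1, item2) pair
def pvTryPair (names : List String) (same : Bool) (m : List (List Int)) (i j : Int) : List (List Int) :=
  match pvStateOf names i, pvStateOf names j with
  | some s1, some s2 =>
    if (same && (s1 == s2)) || (!same && !(s1 == s2)) then pvBumpTry m i j else m
  | _, _ => m

def pvLoopA (names : List String) (same : Bool) : List (List Int) → List Int → List Int → List (List Int)
  | m, _, [] => m
  | m, items, item1 :: rest =>
    -- items.remove(item1): never fails here (items always holds the not-yet-visited cluster suffix)
    let items' := (PySem.List.remove? items item1).getD []
    let m' := items'.foldl (fun mm item2 => pvTryPair names same mm item1 item2) m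
    pvLoopA names same m' items' rest

def connect_cities_states (matrix : List (List Int)) (cluster : List Int) (names : List String) (same : Bool) : List (List Int) :=
  pvLoopA names same matrix cluster cluster

-- ===== PORT B =====

-- first loop of B: `for pos, item in enumerate(cluster)` building dict state -> positions
def pvGroups (cluster : List Int) (names : List String) : PySem.Dict Int (List Nat) :=
  cluster.zipIdx.foldl
    (fun d pe =>
      match pvStateOf names pe.1 with
      | none => d
      | some s => d.modify s [] (fun l => l ++ [pe.2]))
    PySem.Dict.empty

-- B's same=True pair loop: for g in order: for a in range(len(g)): for b in range(a+1, len(g))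
def pvPairsSame (order : List (List Nat)) : List (Nat × Nat) :=
  order.foldl (fun pairs g =>
    (List.range g.length).foldl (fun pairs a =>
      (List.range' (a+1) (g.length - (a+1))).foldl (fun pairs b =>
        pairs ++ [(g.getD a 0, g.getD b 0)]) pairs) pairs) []

-- B's same=False pair loop: for a in range(len(order)): for b in range(a+1, len(order)): for p in order[a]: for q in order[b]
def pvPairsDiff (order : List (List Nat)) : List (Nat × Nat) :=
  (List.range order.length).foldl (fun pairs a =>
    (List.range' (a+1) (order.length - (a+1))).foldl (fun pairs b =>
      (order.getD a []).foldl (fun pairs p =>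
        (order.getD b []).foldl (fun pairs q =>
          pairs ++ [(min p q, max p q)]) pairs) pairs) pairs) []

def connect_cities_states_alt (matrix : List (List Int)) (cluster : List Int) (names : List String) (same : Bool) : List (List Int) :=
  let order := (pvGroups cluster names).values
  let pairs := if same then pvPairsSame order else pvPairsDiff order
  pairs.foldl (fun m pq => pvBumpTry m (cluster.getD pq.1 0) (cluster.getD pq.2 0)) matrix

-- ===== PRECONDITION & SPEC =====
def Spec_connect_cities_states (matrix : List (List Int)) (cluster : List Int) (names : List String) (same : Bool) (out : List (List Int)) : Prop := out = connect_cities_states_alt matrix cluster names same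
instance (matrix : List (List Int)) (cluster : List Int) (names : List String) (same : Bool) (out : List (List Int)) : Decidable (Spec_connect_cities_states matrix cluster names same out) := by unfold Spec_connect_cities_states; infer_instance

-- ===== CLAIM (what is proved, stated in full; the proofs are below) =====
def Claim_equal_connect_cities_states : Prop := ∀ (matrix : List (List Int)) (cluster : List Int) (names : List String) (same : Bool), Dom_connect_cities_states matrix cluster names same → Spec_connect_cities_states matrix cluster names same (connect_cities_states matrix cluster names same)

-- ===== LEMMAS AND PROOFS =====

def pvRowIncr (row : List Int) (c : Nat) : List Int := row.set c (row.getD c 0 + 1)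
def pvIncr (m : List (List Int)) (rc : Nat × Nat) : List (List Int) :=
  m.set rc.1 (pvRowIncr (m.getD rc.1 []) rc.2)

theorem pyIdx?_lt {n : Nat} {i : Int} {k : Nat} (h : PySem.List.pyIdx? n i = some k) : k < n := by
  unfold PySem.List.pyIdx? at h
  split_ifs at h with h1 h2 h3 <;> simp_all <;> omega

theorem getD_set_ne (l : List Int) (c c' : Nat) (v : Int) (h : c ≠ c') :
    (l.set c v).getD c' 0 = l.getD c' 0 := by
  simp [List.getD_eq_getElem?_getD, List.getElem?_set_ne h]

theorem pvRowIncr_comm (row : List Int) (c1 c2 : Nat) :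
    pvRowIncr (pvRowIncr row c1) c2 = pvRowIncr (pvRowIncr row c2) c1 := by
  by_cases h : c1 = c2
  · subst h; rfl
  · unfold pvRowIncr
    rw [getD_set_ne _ _ _ _ h, getD_set_ne _ _ _ _ (Ne.symm h), List.set_comm _ _ h]

theorem pvIncr_comm (m : List (List Int)) (a b : Nat × Nat) :
    pvIncr (pvIncr m a) b = pvIncr (pvIncr m b) a := by
  obtain ⟨r1, c1⟩ := a; obtain ⟨r2, c2⟩ := b
  by_cases h : r1 = r2
  · subst h
    simp only [pvIncr]
    by_cases hr : r1 < m.length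
    · rw [List.set_set, List.set_set]
      congr 1
      have : ∀ c, (m.set r1 (pvRowIncr (m.getD r1 []) c)).getD r1 [] = pvRowIncr (m.getD r1 []) c := by
        intro c
        simp [List.getD_eq_getElem?_getD, List.getElem?_set_self, hr]
      rw [this, this, pvRowIncr_comm]
    · have hl : m.length ≤ r1 := by omega
      simp only [List.set_eq_of_length_le hl]
  · simp only [pvIncr]
    have h1 : ∀ (x : List Int), (m.set r2 x).getD r1 [] = m.getD r1 [] := by
      intro x; simp [List.getD_eq_getElem?_getD, List.getElem?_set_ne (Ne.symm h)]
    have h2 : ∀ (x : List Int), (m.set r1 x).getD r2 [] = m.getD r2 [] := by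
      intro x; simp [List.getD_eq_getElem?_getD, List.getElem?_set_ne h]
    rw [h1, h2, List.set_comm _ _ h]

theorem pvIncr_shape (m : List (List Int)) (rc : Nat × Nat) :
    (pvIncr m rc).map List.length = m.map List.length := by
  obtain ⟨r, c⟩ := rc
  by_cases hr : r < m.length
  · simp only [pvIncr, List.map_set]
    have : (pvRowIncr (m.getD r []) c).length = (m.map List.length).getD r 0 := by
      simp [pvRowIncr, List.getD_eq_getElem?_getD, List.getElem?_map, hr,
        List.getElem?_eq_getElem hr]
    rw [this]
    have hr' : r < (m.map List.length).length := by simpa using hr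
    rw [List.getD_eq_getElem?_getD, List.getElem?_eq_getElem hr']
    simp only [Option.getD_some]
    exact List.set_getElem_self hr'
  · simp [pvIncr, List.set_eq_of_length_le (by omega : m.length ≤ r)]

def pvCix (sh : List Nat) (i j : Int) : Option (Nat × Nat) :=
  (PySem.List.pyIdx? sh.length i).bind (fun r => (PySem.List.pyIdx? (sh.getD r 0) j).map (fun c => (r, c)))

def pvOps (sh : List Nat) (i j : Int) : List (Nat × Nat) :=
  match pvCix sh i j with
  | none => []
  | some rc => rc :: (match pvCix sh j i with | none => [] | some rc2 => [rc2])

def pvBump1 (m : List (List Int)) (i j : Int) : List (List Int) :=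
  match pvCix (m.map List.length) i j with
  | none => m
  | some rc => pvIncr m rc

theorem shape_getD (m : List (List Int)) (r : Nat) (hr : r < m.length) :
    (m.map List.length).getD r 0 = (m.getD r []).length := by
  rw [List.getD_eq_getElem?_getD, List.getD_eq_getElem?_getD,
    List.getElem?_eq_getElem (by simpa using hr), List.getElem?_eq_getElem hr]
  simp

theorem getD_eq_getElem' (m : List (List Int)) (r : Nat) (hr : r < m.length) :
    m.getD r [] = m[r] := by
  rw [List.getD_eq_getElem?_getD, List.getElem?_eq_getElem hr]; rfl

theorem bump1_raw (m : List (List Int)) (i j : Int) :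
    (match PySem.List.pyGet? m i with
     | none => m
     | some row =>
       match PySem.List.pyGet? row j with
       | none => m
       | some v => PySem.List.pySetD m i (PySem.List.pySetD row j (v + 1))) = pvBump1 m i j := by
  unfold pvBump1 pvCix
  simp only [List.length_map]
  cases h1 : PySem.List.pyIdx? m.length i with
  | none => simp only [PySem.List.pyGet?, h1, Option.bind_none, Option.bind]
  | some r =>
    have hr : r < m.length := pyIdx?_lt h1
    have hrow := getD_eq_getElem' m r hr
    simp only [PySem.List.pyGet?, h1, Option.bind_some, List.getElem?_eq_getElem hr,
      shape_getD m r hr, hrow]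
    cases h2 : PySem.List.pyIdx? (m[r] : List Int).length j with
    | none => simp only [h2, Option.bind_none, Option.map_none, Option.bind]
    | some c =>
      have hc : c < (m[r] : List Int).length := pyIdx?_lt h2
      simp only [h2, Option.map_some, List.getElem?_eq_getElem hc, Option.bind_some]
      simp only [PySem.List.pySetD, PySem.List.pySet?, h1, h2, Option.map_some, Option.getD_some,
        pvIncr, pvRowIncr, hrow]
      congr 2
      rw [List.getD_eq_getElem?_getD, List.getElem?_eq_getElem hc]; rfl

theorem bumpTry_eq (m : List (List Int)) (i j : Int) :
    pvBumpTry m i j = (pvOps (m.map List.length) i j).foldl pvIncr m := by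
  unfold pvBumpTry pvOps
  cases h1 : pvCix (m.map List.length) i j with
  | none =>
    unfold pvCix at h1
    simp only [List.length_map] at h1
    cases h : PySem.List.pyIdx? m.length i with
    | none => simp only [PySem.List.pyGet?, h, Option.bind_none, Option.bind, List.foldl_nil]
    | some r =>
      have hr : r < m.length := pyIdx?_lt h
      have hrow := getD_eq_getElem' m r hr
      simp only [h, Option.bind_some, shape_getD m r hr, hrow] at h1
      cases h2 : PySem.List.pyIdx? (m[r] : List Int).length j with
      | some c => rw [h2] at h1; simp at h1
      | none =>
        simp only [PySem.List.pyGet?, h, Option.bind_some, List.getElem?_eq_getElem hr,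
          h2, Option.bind_none, Option.bind, List.foldl_nil]
  | some rc =>
    unfold pvCix at h1
    simp only [List.length_map] at h1
    cases h : PySem.List.pyIdx? m.length i with
    | none => rw [h] at h1; simp at h1
    | some r =>
      have hr : r < m.length := pyIdx?_lt h
      have hrow := getD_eq_getElem' m r hr
      simp only [h, Option.bind_some, shape_getD m r hr, hrow] at h1
      cases h2 : PySem.List.pyIdx? (m[r] : List Int).length j with
      | none => rw [h2] at h1; simp at h1
      | some c =>
        rw [h2] at h1
        simp only [Option.map_some, Option.some.injEq] at h1
        subst h1
        have hc : c < (m[r] : List Int).length := pyIdx?_lt h2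
        have hget : PySem.List.pyGet? m i = some (m[r] : List Int) := by
          simp [PySem.List.pyGet?, h, List.getElem?_eq_getElem hr]
        have hget2 : PySem.List.pyGet? (m[r] : List Int) j = some ((m[r] : List Int)[c]) := by
          simp [PySem.List.pyGet?, h2, List.getElem?_eq_getElem hc]
        simp only [hget, hget2]
        have hset : PySem.List.pySetD m i (PySem.List.pySetD (m[r] : List Int) j ((m[r] : List Int)[c] + 1))
            = pvIncr m (r, c) := by
          simp only [PySem.List.pySetD, PySem.List.pySet?, h, h2, Option.map_some, Option.getD_some,
            pvIncr, pvRowIncr, hrow]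
          congr 2
          rw [List.getD_eq_getElem?_getD, List.getElem?_eq_getElem hc]; rfl
        rw [hset, bump1_raw (pvIncr m (r, c)) j i]
        unfold pvBump1
        rw [pvIncr_shape]
        cases h3 : pvCix (m.map List.length) j i <;> simp [List.foldl]

theorem foldl_incr_shape (m : List (List Int)) (l : List (Nat × Nat)) :
    (l.foldl pvIncr m).map List.length = m.map List.length := by
  induction l generalizing m with
  | nil => rfl
  | cons x t ih => simp only [List.foldl_cons, ih, pvIncr_shape]

theorem bumpTry_comm (m : List (List Int)) (i j k l : Int) :
    pvBumpTry (pvBumpTry m i j) k l = pvBumpTry (pvBumpTry m k l) i j := by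
  rw [bumpTry_eq m i j, bumpTry_eq m k l, bumpTry_eq, bumpTry_eq, foldl_incr_shape, foldl_incr_shape,
    ← List.foldl_append, ← List.foldl_append]
  exact List.Perm.foldl_eq' (List.perm_append_comm)
    (fun x _ y _ z => pvIncr_comm z x y) m

def pvPT {α : Type} : List α → List (α × α)
  | [] => []
  | x :: t => t.map (fun y => (x, y)) ++ pvPT t

def pvQ (names : List String) (same : Bool) (i j : Int) : Bool :=
  match pvStateOf names i, pvStateOf names j with
  | some s1, some s2 => (same && (s1 == s2)) || (!same && !(s1 == s2))
  | _, _ => false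

theorem tryPair_eq (names : List String) (same : Bool) (m : List (List Int)) (i j : Int) :
    pvTryPair names same m i j = if pvQ names same i j then pvBumpTry m i j else m := by
  unfold pvTryPair pvQ
  cases pvStateOf names i <;> cases pvStateOf names j <;> simp

theorem pvLoopA_eq (names : List String) (same : Bool) (m : List (List Int)) (l : List Int) :
    pvLoopA names same m l l
      = (pvPT l).foldl (fun mm pq => pvTryPair names same mm pq.1 pq.2) m := by
  induction l generalizing m with
  | nil => rfl
  | cons x t ih =>
    show pvLoopA names same m (x :: t) (x :: t) = _
    unfold pvLoopA
    simp only [PySem.List.remove?_cons_self, Option.getD_some]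
    rw [ih]
    rw [show pvPT (x :: t) = t.map (fun y => (x, y)) ++ pvPT t from rfl,
      List.foldl_append, List.foldl_map]

theorem connect_eq_foldl (matrix : List (List Int)) (cluster : List Int) (names : List String) (same : Bool) :
    connect_cities_states matrix cluster names same
      = ((pvPT cluster).filter (fun pq => pvQ names same pq.1 pq.2)).foldl
          (fun mm pq => pvBumpTry mm pq.1 pq.2) matrix := by
  unfold connect_cities_states
  rw [pvLoopA_eq]
  simp only [tryPair_eq]
  exact PySem.List.foldl_if_eq_foldl_filter (fun pq : Int × Int => pvQ names same pq.1 pq.2)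
    (fun mm pq => pvBumpTry mm pq.1 pq.2) (pvPT cluster) matrix

theorem pvPT_cons {α : Type} (x : α) (t : List α) :
    pvPT (x :: t) = t.map (fun y => (x, y)) ++ pvPT t := rfl

theorem mem_pvPT {α : Type} {l : List α} {a b : α} (h : (a, b) ∈ pvPT l) : a ∈ l ∧ b ∈ l := by
  induction l with
  | nil => simp [pvPT] at h
  | cons x t ih =>
    rw [pvPT_cons, List.mem_append] at h
    rcases h with h | h
    · simp only [List.mem_map] at h
      obtain ⟨y, hy, he⟩ := h
      cases he
      exact ⟨List.mem_cons_self, List.mem_cons_of_mem _ hy⟩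
    · obtain ⟨h1, h2⟩ := ih h
      exact ⟨List.mem_cons_of_mem _ h1, List.mem_cons_of_mem _ h2⟩

theorem pvPT_rel {α : Type} {R : α → α → Prop} {l : List α} (hp : l.Pairwise R)
    {a b : α} (h : (a, b) ∈ pvPT l) : R a b := by
  induction l with
  | nil => simp [pvPT] at h
  | cons x t ih =>
    rw [List.pairwise_cons] at hp
    rw [pvPT_cons, List.mem_append] at h
    rcases h with h | h
    · simp only [List.mem_map] at h
      obtain ⟨y, hy, he⟩ := h
      cases he
      exact hp.1 _ hy
    · exact ih hp.2 h

theorem mem_pvPT_of_lt {l : List Nat} (hp : l.Pairwise (· < ·)) {a b : Nat}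
    (ha : a ∈ l) (hb : b ∈ l) (hab : a < b) : (a, b) ∈ pvPT l := by
  induction l with
  | nil => simp at ha
  | cons x t ih =>
    rw [List.pairwise_cons] at hp
    rw [pvPT_cons, List.mem_append]
    rcases List.mem_cons.mp ha with rfl | ha'
    · rcases List.mem_cons.mp hb with rfl | hb'
      · omega
      · exact Or.inl (List.mem_map.mpr ⟨b, hb', rfl⟩)
    · rcases List.mem_cons.mp hb with rfl | hb'
      · have := hp.1 _ ha'; omega
      · exact Or.inr (ih hp.2 ha' hb')

theorem nodup_pvPT {α : Type} {l : List α} (h : l.Nodup) : (pvPT l).Nodup := by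
  induction l with
  | nil => exact List.nodup_nil
  | cons x t ih =>
    rw [List.nodup_cons] at h
    rw [pvPT_cons]
    refine List.Nodup.append ?_ (ih h.2) ?_
    · exact h.2.map (fun a b hab => by simpa using congrArg Prod.snd hab)
    · intro z hz1 hz2
      obtain ⟨y, _, rfl⟩ := List.mem_map.mp hz1
      exact h.1 (mem_pvPT hz2).1

theorem pvPT_not_rev {α : Type} {l : List α} (h : l.Nodup) {a b : α}
    (hm : (a, b) ∈ pvPT l) : (b, a) ∉ pvPT l := by
  intro hr
  induction l with
  | nil => simp [pvPT] at hm
  | cons x t ih =>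
    rw [List.nodup_cons] at h
    rw [pvPT_cons, List.mem_append] at hm hr
    rcases hm with hm | hm <;> rcases hr with hr | hr
    · obtain ⟨y, hy, he⟩ := List.mem_map.mp hm
      obtain ⟨z, hz, he2⟩ := List.mem_map.mp hr
      cases he; cases congrArg Prod.fst he2; cases congrArg Prod.snd he2
      exact h.1 (by assumption)
    · obtain ⟨y, hy, he⟩ := List.mem_map.mp hm
      cases he
      exact h.1 (mem_pvPT hr).2
    · obtain ⟨y, hy, he⟩ := List.mem_map.mp hr
      cases he
      exact h.1 (mem_pvPT hm).2
    · exact ih h.2 hm hr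

theorem pvPT_or_rev {α : Type} {l : List α} (h : l.Nodup) {a b : α}
    (hab : a ≠ b) (ha : a ∈ l) (hb : b ∈ l) : (a, b) ∈ pvPT l ∨ (b, a) ∈ pvPT l := by
  induction l with
  | nil => simp at ha
  | cons x t ih =>
    rw [List.nodup_cons] at h
    rw [pvPT_cons]
    rcases List.mem_cons.mp ha with rfl | ha'
    · rcases List.mem_cons.mp hb with rfl | hb'
      · exact absurd rfl hab
      · exact Or.inl (List.mem_append.mpr (Or.inl (List.mem_map.mpr ⟨b, hb', rfl⟩)))
    · rcases List.mem_cons.mp hb with rfl | hb'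
      · exact Or.inr (List.mem_append.mpr (Or.inl (List.mem_map.mpr ⟨a, ha', rfl⟩)))
      · rcases ih h.2 ha' hb' with hh | hh
        · exact Or.inl (List.mem_append.mpr (Or.inr hh))
        · exact Or.inr (List.mem_append.mpr (Or.inr hh))

theorem pvPT_map {α β : Type} (f : α → β) (l : List α) :
    pvPT (l.map f) = (pvPT l).map (Prod.map f f) := by
  induction l with
  | nil => rfl
  | cons x t ih =>
    rw [List.map_cons, pvPT_cons, pvPT_cons, ih, List.map_append, List.map_map, List.map_map]
    rfl

def pvVal (cluster : List Int) (p : Nat) : Int := cluster.getD p 0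
def pvSt (cluster : List Int) (names : List String) (p : Nat) : Option Int :=
  pvStateOf names (pvVal cluster p)
def pvKey (cluster : List Int) (names : List String) (p : Nat) : Int :=
  (pvSt cluster names p).getD 0
def pvDP (cluster : List Int) (names : List String) : List Nat :=
  (List.range cluster.length).filter (fun p => (pvSt cluster names p).isSome)
def pvS (cluster : List Int) (names : List String) : List Int :=
  PySem.Set.ofList ((pvDP cluster names).map (pvKey cluster names))
def pvG (cluster : List Int) (names : List String) (s : Int) : List Nat :=
  (pvDP cluster names).filter (fun p => pvKey cluster names p == s)
def pvCOne (g1 g2 : List Nat) : List (Nat × Nat) :=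
  g1.flatMap (fun p => g2.map (fun q => (min p q, max p q)))

theorem range_map_getD {α : Type} (l : List α) (d : α) :
    (List.range l.length).map (fun p => l.getD p d) = l := by
  apply List.ext_getElem
  · simp
  · intro i h1 h2
    simp [List.getD_eq_getElem?_getD, List.getElem?_eq_getElem h2]

theorem zipIdx_eq_map_range {α : Type} (l : List α) (d : α) :
    l.zipIdx = (List.range l.length).map (fun p => (l.getD p d, p)) := by
  apply List.ext_getElem
  · simp
  · intro i h1 h2
    rw [List.getElem_zipIdx]
    simp [List.getD_eq_getElem?_getD, List.getElem?_eq_getElem (by simpa using h1)]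

theorem pvGroups_eq (cluster : List Int) (names : List String) :
    pvGroups cluster names
      = (pvDP cluster names).foldl
          (fun d p => d.modify (pvKey cluster names p) [] (fun l => l ++ [p])) PySem.Dict.empty := by
  unfold pvGroups pvDP
  rw [zipIdx_eq_map_range cluster 0, List.foldl_map]
  have hstep : ∀ (d : PySem.Dict Int (List Nat)) (pos : Nat),
      (match pvStateOf names (cluster.getD pos 0) with
       | none => d
       | some s => d.modify s [] (fun l => l ++ [pos]))
      = if (pvSt cluster names pos).isSome
        then d.modify (pvKey cluster names pos) [] (fun l => l ++ [pos]) else d := by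
    intro d pos
    rw [show cluster.getD pos 0 = cluster[pos]?.getD 0 from List.getD_eq_getElem?_getD]
    cases h : pvStateOf names (cluster[pos]?.getD 0) with
    | none => simp [pvSt, pvVal, h, List.getD_eq_getElem?_getD]
    | some s => simp [pvSt, pvVal, pvKey, h, List.getD_eq_getElem?_getD]
  simp only [hstep]
  exact PySem.List.foldl_if_eq_foldl_filter (fun p => (pvSt cluster names p).isSome)
    (fun d p => d.modify (pvKey cluster names p) [] (fun l => l ++ [p]))
    (List.range cluster.length) PySem.Dict.empty

theorem pvGroups_keys (cluster : List Int) (names : List String) :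
    (pvGroups cluster names).keys = pvS cluster names := by
  rw [pvGroups_eq]
  rw [PySem.Dict.keys_foldl_modify_key (pvDP cluster names) (pvKey cluster names) []
    (fun _ x => fun l => l ++ [x]) PySem.Dict.empty]
  simp [pvS, PySem.Set.update_nil_left]

theorem pvGroups_keys_nodup (cluster : List Int) (names : List String) :
    (pvGroups cluster names).keys.Nodup := by
  rw [pvGroups_eq]
  exact PySem.Dict.nodup_keys_foldl_modify_key _ _ _ _ _ (by simp)

theorem pvGroups_getD (cluster : List Int) (names : List String) (s : Int) :
    (pvGroups cluster names).getD s [] = pvG cluster names s := by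
  rw [pvGroups_eq]
  have : (pvDP cluster names).foldl
      (fun d p => d.modify (pvKey cluster names p) [] (fun l => l ++ [p])) PySem.Dict.empty
      = ((pvDP cluster names).map (fun p => (pvKey cluster names p, p))).foldl
          (fun d pr => d.modify pr.1 [] (fun l => l ++ [pr.2])) PySem.Dict.empty := by
    rw [List.foldl_map]
  rw [this, PySem.Dict.getD_foldl_modify_append]
  simp only [PySem.Dict.getD_empty, List.nil_append, List.filter_map, List.map_map]
  unfold pvG
  simp only [Function.comp_def]
  simp

theorem pvOrder_eq (cluster : List Int) (names : List String) :
    (pvGroups cluster names).values = (pvS cluster names).map (pvG cluster names) := by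
  rw [PySem.Dict.values_eq_map_keys _ (pvGroups_keys_nodup cluster names) []]
  rw [pvGroups_keys]
  exact List.map_congr_left (fun s _ => pvGroups_getD cluster names s)

theorem range'_shift (s n : Nat) : List.range' (s+1) n = (List.range' s n).map Nat.succ := by
  rw [List.range'_eq_map_range, List.range'_eq_map_range, List.map_map]
  apply List.map_congr_left
  intro b _
  simp [Function.comp]
  omega

theorem flatMap_single {α β : Type} (l : List α) (h : α → β) :
    l.flatMap (fun x => [h x]) = l.map h := by
  induction l with
  | nil => rfl
  | cons x t ih => simp [List.flatMap_cons, ih]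

theorem flatMap_pair_id {α : Type} (l : List (α × α)) : l.flatMap (fun p => [(p.1, p.2)]) = l := by
  induction l with
  | nil => rfl
  | cons x t ih => cases x; simp [List.flatMap_cons, ih]

theorem idx_foldl_eq {α β : Type} (d : α) (f : α → α → List β) (l : List α) :
    ∀ (acc : List β),
      (List.range l.length).foldl
        (fun ac a =>
          (List.range' (a+1) (l.length - (a+1))).foldl
            (fun ac b => ac ++ f (l.getD a d) (l.getD b d)) ac) acc
      = acc ++ (pvPT l).flatMap (fun p => f p.1 p.2) := by
  induction l with
  | nil => intro acc; simp [pvPT]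
  | cons x t ih =>
    intro acc
    rw [List.length_cons, List.range_succ_eq_map, List.foldl_cons, List.foldl_map]
    have h0 : (List.range' (0+1) (t.length + 1 - (0+1))).foldl
        (fun ac b => ac ++ f ((x :: t).getD 0 d) ((x :: t).getD b d)) acc
        = acc ++ t.flatMap (fun y => f x y) := by
      have he : t.length + 1 - (0+1) = t.length := by omega
      rw [he, show (0+1 : Nat) = 1 from rfl, show (1 : Nat) = 0 + 1 from rfl,
        range'_shift 0 t.length, List.foldl_map]
      have hstep : ∀ (ac : List β) (b : Nat), b ∈ List.range' 0 t.length →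
          ac ++ f ((x :: t).getD 0 d) ((x :: t).getD (Nat.succ b) d)
          = ac ++ f x (t.getD b d) := by
        intro ac b _
        simp only [Nat.succ_eq_add_one, List.getD_cons_succ, List.getD_cons_zero]
      refine (PySem.List.foldl_congr_mem _ _ _ _ hstep).trans ?_
      rw [show List.range' 0 t.length = List.range t.length from List.range_eq_range'.symm]
      rw [PySem.List.foldl_append_eq_flatMap (fun b => f x (t.getD b d)) (List.range t.length) acc]
      congr 1
      have hmm := List.flatMap_map (f := fun p => t.getD p d) (g := fun y => f x y)
        (l := List.range t.length)
      rw [range_map_getD t d] at hmm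
      exact hmm.symm
    have hstep2 : ∀ (ac : List β) (a : Nat), a ∈ List.range t.length →
        (List.range' (Nat.succ a + 1) (t.length + 1 - (Nat.succ a + 1))).foldl
          (fun ac b => ac ++ f ((x :: t).getD (Nat.succ a) d) ((x :: t).getD b d)) ac
        = (List.range' (a+1) (t.length - (a+1))).foldl
            (fun ac b => ac ++ f (t.getD a d) (t.getD b d)) ac := by
      intro ac a _
      have he : t.length + 1 - (Nat.succ a + 1) = t.length - (a+1) := by omega
      rw [he, show Nat.succ a + 1 = (a+1) + 1 from rfl, range'_shift (a+1), List.foldl_map]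
      rfl
    refine (PySem.List.foldl_congr_mem _ _ _ _ hstep2).trans ?_
    rw [ih, h0, pvPT_cons, List.flatMap_append, List.flatMap_map, List.append_assoc]

theorem pvPairsSame_eq (order : List (List Nat)) :
    pvPairsSame order = order.flatMap pvPT := by
  unfold pvPairsSame
  have hstep : ∀ (ac : List (Nat × Nat)) (g : List Nat), g ∈ order →
      (List.range g.length).foldl (fun pairs a =>
        (List.range' (a+1) (g.length - (a+1))).foldl (fun pairs b =>
          pairs ++ [(g.getD a 0, g.getD b 0)]) pairs) ac
      = ac ++ pvPT g := by
    intro ac g _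
    exact (idx_foldl_eq 0 (fun p q => [(p, q)]) g ac).trans (by rw [flatMap_pair_id])
  refine (PySem.List.foldl_congr_mem _ _ _ _ hstep).trans ?_
  rw [PySem.List.foldl_append_eq_flatMap pvPT order []]
  rfl

theorem double_foldl_cone (g1 g2 : List Nat) (acc : List (Nat × Nat)) :
    g1.foldl (fun pairs p => g2.foldl (fun pairs q => pairs ++ [(min p q, max p q)]) pairs) acc
    = acc ++ pvCOne g1 g2 := by
  have hin : ∀ (a : List (Nat × Nat)) (p : Nat),
      g2.foldl (fun pairs q => pairs ++ [(min p q, max p q)]) a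
      = a ++ g2.map (fun q => (min p q, max p q)) := by
    intro a p
    rw [PySem.List.foldl_append_eq_flatMap (fun q => [(min p q, max p q)]) g2 a,
      flatMap_single]
  simp only [hin]
  exact PySem.List.foldl_append_eq_flatMap (fun p => g2.map fun q => (min p q, max p q)) g1 acc

theorem pvPairsDiff_eq (order : List (List Nat)) :
    pvPairsDiff order = (pvPT order).flatMap (fun gg => pvCOne gg.1 gg.2) := by
  unfold pvPairsDiff
  have hbody : ∀ (ac : List (Nat × Nat)) (a : Nat), a ∈ List.range order.length →
      (List.range' (a+1) (order.length - (a+1))).foldl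
        (fun pairs b =>
          (order.getD a []).foldl (fun pairs p =>
            (order.getD b []).foldl (fun pairs q =>
              pairs ++ [(min p q, max p q)]) pairs) pairs) ac
      = (List.range' (a+1) (order.length - (a+1))).foldl
          (fun pairs b => pairs ++ pvCOne (order.getD a []) (order.getD b [])) ac := by
    intro ac a _
    exact PySem.List.foldl_congr_mem _ _ _ _ (fun ac2 b _ => double_foldl_cone _ _ ac2)
  refine (PySem.List.foldl_congr_mem _ _ _ _ hbody).trans ?_
  exact (idx_foldl_eq [] (fun g1 g2 => pvCOne g1 g2) order []).trans (by simp)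

theorem alt_eq (matrix : List (List Int)) (cluster : List Int) (names : List String) (same : Bool) :
    connect_cities_states_alt matrix cluster names same
      = (if same then (pvS cluster names).flatMap (fun s => pvPT (pvG cluster names s))
         else (pvPT (pvS cluster names)).flatMap
             (fun st => pvCOne (pvG cluster names st.1) (pvG cluster names st.2))).foldl
          (fun mm pq => pvBumpTry mm (pvVal cluster pq.1) (pvVal cluster pq.2)) matrix := by
  unfold connect_cities_states_alt
  rw [pvOrder_eq]
  cases same with
  | true =>
    simp only [if_true]
    rw [pvPairsSame_eq, List.flatMap_map]
    rfl
  | false =>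
    simp only [Bool.false_eq_true, if_false]
    rw [pvPairsDiff_eq, pvPT_map, List.flatMap_map]
    rfl

theorem mem_pvG (cluster : List Int) (names : List String) (s : Int) (p : Nat) :
    p ∈ pvG cluster names s
      ↔ p < cluster.length ∧ (pvSt cluster names p).isSome = true ∧ pvKey cluster names p = s := by
  unfold pvG pvDP
  simp [List.mem_filter, List.mem_range]
  tauto

theorem pvG_pairwise (cluster : List Int) (names : List String) (s : Int) :
    (pvG cluster names s).Pairwise (· < ·) := by
  exact (List.pairwise_lt_range.filter _).filter _

theorem pvG_nodup (cluster : List Int) (names : List String) (s : Int) :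
    (pvG cluster names s).Nodup :=
  (pvG_pairwise cluster names s).imp (fun h => Nat.ne_of_lt h)

theorem key_mem_pvS (cluster : List Int) (names : List String) (p : Nat)
    (hp : p < cluster.length) (hs : (pvSt cluster names p).isSome = true) :
    pvKey cluster names p ∈ pvS cluster names := by
  unfold pvS
  rw [PySem.Set.mem_ofList]
  exact List.mem_map.mpr ⟨p, by simp [pvDP, List.mem_filter, List.mem_range, hp, hs], rfl⟩

theorem pvS_nodup (cluster : List Int) (names : List String) : (pvS cluster names).Nodup :=
  PySem.Set.nodup_ofList _

theorem pvQ_char (cluster : List Int) (names : List String) (same : Bool) (p q : Nat) :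
    pvQ names same (pvVal cluster p) (pvVal cluster q)
      = ((pvSt cluster names p).isSome && (pvSt cluster names q).isSome
          && (same == (pvKey cluster names p == pvKey cluster names q))) := by
  unfold pvQ pvSt pvKey
  cases h1 : pvStateOf names (pvVal cluster p) <;> cases h2 : pvStateOf names (pvVal cluster q) <;>
    simp [pvSt, h1, h2] <;> cases same <;> simp

theorem nodup_flatMap' {α β : Type} (L : List α) (B : α → List β) (hL : L.Nodup)
    (hB : ∀ x ∈ L, (B x).Nodup)
    (hd : ∀ x ∈ L, ∀ y ∈ L, x ≠ y → ∀ z ∈ B x, z ∉ B y) : (L.flatMap B).Nodup := by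
  induction L with
  | nil => simp
  | cons x t ih =>
    rw [List.nodup_cons] at hL
    rw [List.flatMap_cons]
    refine List.Nodup.append (hB x List.mem_cons_self) ?_ ?_
    · exact ih hL.2 (fun y hy => hB y (List.mem_cons_of_mem _ hy))
        (fun a ha b hb => hd a (List.mem_cons_of_mem _ ha) b (List.mem_cons_of_mem _ hb))
    · intro z hz1 hz2
      obtain ⟨y, hy, hzy⟩ := List.mem_flatMap.mp hz2
      exact hd x List.mem_cons_self y (List.mem_cons_of_mem _ hy)
        (fun he => hL.1 (he ▸ hy)) z hz1 hzy

theorem mem_pvPT_sorted {l : List Nat} (hp : l.Pairwise (· < ·)) (a b : Nat) :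
    (a, b) ∈ pvPT l ↔ a ∈ l ∧ b ∈ l ∧ a < b := by
  constructor
  · intro h
    exact ⟨(mem_pvPT h).1, (mem_pvPT h).2, pvPT_rel hp h⟩
  · rintro ⟨h1, h2, h3⟩
    exact mem_pvPT_of_lt hp h1 h2 h3

theorem mem_pvPT_range (n : Nat) (a b : Nat) :
    (a, b) ∈ pvPT (List.range n) ↔ a < b ∧ b < n := by
  rw [mem_pvPT_sorted List.pairwise_lt_range]
  simp only [List.mem_range]
  omega

theorem mem_pvCOne (g1 g2 : List Nat) (z : Nat × Nat) :
    z ∈ pvCOne g1 g2 ↔ ∃ p ∈ g1, ∃ q ∈ g2, z = (min p q, max p q) := by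
  simp [pvCOne, List.mem_flatMap, List.mem_map, eq_comm]

theorem pvCOne_nodup (g1 g2 : List Nat) (h1 : g1.Nodup) (h2 : g2.Nodup)
    (hdisj : ∀ p ∈ g1, p ∉ g2) : (pvCOne g1 g2).Nodup := by
  refine nodup_flatMap' g1 _ h1 (fun p hp => ?_) (fun p hp p' hp' hne z hz hz' => ?_)
  · refine h2.map_on (fun q hq q' hq' he => ?_)
    have hpq : p ≠ q := fun h => hdisj p hp (h ▸ hq)
    have hpq' : p ≠ q' := fun h => hdisj p hp (h ▸ hq')
    have e1 := congrArg Prod.fst he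
    have e2 := congrArg Prod.snd he
    simp only at e1 e2
    omega
  · obtain ⟨q, hq, rfl⟩ := List.mem_map.mp hz
    obtain ⟨q', hq', he⟩ := List.mem_map.mp hz'
    have hpq : p ≠ q := fun h => hdisj p hp (h ▸ hq)
    have hp'q' : p' ≠ q' := fun h => hdisj p' hp' (h ▸ hq')
    have hpq' : p ≠ q' := fun h => hdisj p hp (h ▸ hq')
    have hp'q : p' ≠ q := fun h => hdisj p' hp' (h ▸ hq)
    have e1 := congrArg Prod.fst he
    have e2 := congrArg Prod.snd he
    simp only at e1 e2
    omega

theorem perm_true (cluster : List Int) (names : List String) :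
    ((pvPT (List.range cluster.length)).filter
        (fun pq => pvQ names true (pvVal cluster pq.1) (pvVal cluster pq.2))).Perm
      ((pvS cluster names).flatMap (fun s => pvPT (pvG cluster names s))) := by
  apply List.perm_of_nodup_nodup_toFinset_eq
  · exact (nodup_pvPT List.nodup_range).filter _
  · refine nodup_flatMap' _ _ (pvS_nodup cluster names)
      (fun s _ => nodup_pvPT (pvG_nodup cluster names s))
      (fun s _ t _ hst z hzs hzt => ?_)
    obtain ⟨a, b⟩ := z
    have h1 := ((mem_pvG cluster names s a).mp (mem_pvPT hzs).1).2.2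
    have h2 := ((mem_pvG cluster names t a).mp (mem_pvPT hzt).1).2.2
    exact hst (by rw [← h1, ← h2])
  · ext z
    obtain ⟨a, b⟩ := z
    simp only [List.mem_toFinset, List.mem_filter, List.mem_flatMap, mem_pvPT_range, pvQ_char]
    constructor
    · rintro ⟨⟨hab, hbn⟩, hq⟩
      simp only [Bool.and_eq_true] at hq
      obtain ⟨⟨hs1, hs2⟩, hk⟩ := hq
      have hkab : pvKey cluster names a = pvKey cluster names b := by simpa using hk
      refine ⟨pvKey cluster names a, key_mem_pvS cluster names a (by omega) hs1, ?_⟩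
      rw [mem_pvPT_sorted (pvG_pairwise cluster names _)]
      exact ⟨(mem_pvG _ _ _ _).mpr ⟨by omega, hs1, rfl⟩,
        (mem_pvG _ _ _ _).mpr ⟨hbn, hs2, hkab.symm⟩, hab⟩
    · rintro ⟨s, _, hz⟩
      rw [mem_pvPT_sorted (pvG_pairwise cluster names _)] at hz
      obtain ⟨ha, hb, hab⟩ := hz
      obtain ⟨han, hsa, hka⟩ := (mem_pvG _ _ _ _).mp ha
      obtain ⟨hbn, hsb, hkb⟩ := (mem_pvG _ _ _ _).mp hb
      refine ⟨⟨hab, hbn⟩, ?_⟩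
      simp [hsa, hsb, hka, hkb]

theorem perm_false (cluster : List Int) (names : List String) :
    ((pvPT (List.range cluster.length)).filter
        (fun pq => pvQ names false (pvVal cluster pq.1) (pvVal cluster pq.2))).Perm
      ((pvPT (pvS cluster names)).flatMap
        (fun st => pvCOne (pvG cluster names st.1) (pvG cluster names st.2))) := by
  have hGdisj : ∀ s t, s ≠ t → ∀ p ∈ pvG cluster names s, p ∉ pvG cluster names t := by
    intro s t hst p hp hpt
    apply hst
    rw [← ((mem_pvG cluster names s p).mp hp).2.2, ← ((mem_pvG cluster names t p).mp hpt).2.2]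
  have hkeys : ∀ s t, s ≠ t → ∀ z ∈ pvCOne (pvG cluster names s) (pvG cluster names t),
      z.1 < z.2 ∧ z.2 < cluster.length
        ∧ (pvSt cluster names z.1).isSome = true ∧ (pvSt cluster names z.2).isSome = true
        ∧ ((pvKey cluster names z.1 = s ∧ pvKey cluster names z.2 = t)
            ∨ (pvKey cluster names z.1 = t ∧ pvKey cluster names z.2 = s)) := by
    intro s t hst z hz
    obtain ⟨p, hp, q, hq, rfl⟩ := (mem_pvCOne _ _ _).mp hz
    obtain ⟨hpn, hsp, hkp⟩ := (mem_pvG _ _ _ _).mp hp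
    obtain ⟨hqn, hsq, hkq⟩ := (mem_pvG _ _ _ _).mp hq
    have hpq : p ≠ q := by
      intro h
      apply hst
      rw [← hkp, h, hkq]
    rcases Nat.lt_or_ge p q with h | h
    · have h1 : min p q = p := by omega
      have h2 : max p q = q := by omega
      rw [h1, h2]
      exact ⟨h, hqn, hsp, hsq, Or.inl ⟨hkp, hkq⟩⟩
    · have hlt : q < p := by omega
      have h1 : min p q = q := by omega
      have h2 : max p q = p := by omega
      rw [h1, h2]
      exact ⟨hlt, hpn, hsq, hsp, Or.inr ⟨hkq, hkp⟩⟩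
  apply List.perm_of_nodup_nodup_toFinset_eq
  · exact (nodup_pvPT List.nodup_range).filter _
  · refine nodup_flatMap' _ _ (nodup_pvPT (pvS_nodup cluster names))
      (fun st hst => ?_) (fun st hst st' hst' hne z hz hz' => ?_)
    · have hne := pvPT_rel ((pvS_nodup cluster names)) hst
      exact pvCOne_nodup _ _ (pvG_nodup _ _ _) (pvG_nodup _ _ _) (hGdisj _ _ hne)
    · obtain ⟨s, t⟩ := st
      obtain ⟨s', t'⟩ := st'
      have hst1 : s ≠ t := pvPT_rel (pvS_nodup cluster names) hst
      have hst2 : s' ≠ t' := pvPT_rel (pvS_nodup cluster names) hst'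
      obtain ⟨_, _, _, _, hk1⟩ := hkeys s t hst1 z hz
      obtain ⟨_, _, _, _, hk2⟩ := hkeys s' t' hst2 z hz'
      rcases hk1 with ⟨e1, e2⟩ | ⟨e1, e2⟩ <;> rcases hk2 with ⟨e3, e4⟩ | ⟨e3, e4⟩
      · exact hne (by rw [← e1, ← e2, e3, e4])
      · have h1 : t' = s := by rw [← e3]; exact e1
        have h2 : s' = t := by rw [← e4]; exact e2
        have hrev : (t, s) ∈ pvPT (pvS cluster names) := by
          rw [← h2, ← h1]; exact hst'
        exact pvPT_not_rev (pvS_nodup cluster names) hst hrev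
      · have h1 : s' = t := by rw [← e3]; exact e1
        have h2 : t' = s := by rw [← e4]; exact e2
        have hrev : (t, s) ∈ pvPT (pvS cluster names) := by
          rw [← h1, ← h2]; exact hst'
        exact pvPT_not_rev (pvS_nodup cluster names) hst hrev
      · exact hne (by rw [← e1, ← e2, e4, e3])
  · ext z
    obtain ⟨a, b⟩ := z
    simp only [List.mem_toFinset, List.mem_filter, List.mem_flatMap, mem_pvPT_range, pvQ_char]
    constructor
    · rintro ⟨⟨hab, hbn⟩, hq⟩
      simp only [Bool.and_eq_true] at hq
      obtain ⟨⟨hs1, hs2⟩, hk⟩ := hq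
      have hkne : pvKey cluster names a ≠ pvKey cluster names b := by simpa using hk
      have hSa := key_mem_pvS cluster names a (by omega) hs1
      have hSb := key_mem_pvS cluster names b hbn hs2
      rcases pvPT_or_rev (pvS_nodup cluster names) hkne hSa hSb with hm | hm
      · refine ⟨(pvKey cluster names a, pvKey cluster names b), hm, ?_⟩
        rw [mem_pvCOne]
        refine ⟨a, (mem_pvG _ _ _ _).mpr ⟨by omega, hs1, rfl⟩, b,
          (mem_pvG _ _ _ _).mpr ⟨hbn, hs2, rfl⟩, ?_⟩
        simp only [Prod.mk.injEq]
        omega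
      · refine ⟨(pvKey cluster names b, pvKey cluster names a), hm, ?_⟩
        rw [mem_pvCOne]
        refine ⟨b, (mem_pvG _ _ _ _).mpr ⟨hbn, hs2, rfl⟩, a,
          (mem_pvG _ _ _ _).mpr ⟨by omega, hs1, rfl⟩, ?_⟩
        simp only [Prod.mk.injEq]
        omega
    · rintro ⟨⟨s, t⟩, hst, hz⟩
      have hstne : s ≠ t := pvPT_rel (pvS_nodup cluster names) hst
      obtain ⟨h1, h2, h3, h4, hk⟩ := hkeys s t hstne (a, b) hz
      refine ⟨⟨h1, h2⟩, ?_⟩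
      have hkne : pvKey cluster names a ≠ pvKey cluster names b := by
        rcases hk with ⟨e1, e2⟩ | ⟨e1, e2⟩ <;> simp only at e1 e2 <;>
          rw [e1, e2] <;> first | exact hstne | exact hstne.symm
      simp only at h3 h4
      simp [h3, h4, hkne]

theorem range_map_val (cluster : List Int) :
    (List.range cluster.length).map (pvVal cluster) = cluster := by
  apply List.ext_getElem
  · simp
  · intro i h1 h2
    simp [pvVal, List.getD_eq_getElem?_getD, List.getElem?_eq_getElem h2]

theorem main_eq (matrix : List (List Int)) (cluster : List Int) (names : List String) (same : Bool) :
    connect_cities_states matrix cluster names same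
      = connect_cities_states_alt matrix cluster names same := by
  rw [connect_eq_foldl, alt_eq]
  have h1 : pvPT cluster
      = (pvPT (List.range cluster.length)).map (Prod.map (pvVal cluster) (pvVal cluster)) := by
    conv_lhs => rw [← range_map_val cluster]
    exact pvPT_map _ _
  rw [h1, List.filter_map, List.foldl_map]
  cases same with
  | true =>
    simp only [if_true]
    exact List.Perm.foldl_eq' (perm_true cluster names)
      (fun x _ y _ z => bumpTry_comm z _ _ _ _) matrix
  | false =>
    simp only [Bool.false_eq_true, if_false]
    exact List.Perm.foldl_eq' (perm_false cluster names)
      (fun x _ y _ z => bumpTry_comm z _ _ _ _) matrix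

-- ===== VERDICT (by name: the statement is the Claim_ definition above) =====
theorem connect_cities_states_spec : Claim_equal_connect_cities_states := by
  intro matrix cluster names same _
  exact main_eq matrix cluster names same
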